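-- pv_equiv track=rewrite | github.com/Dioufamad/ATIP3_intro | CICS_dev_version/slate_engines/fs_engine.py | OMC_founder_in_dict_MCs_MCCs
-- ===== SOURCE A (Python) =====
-- def OMC_founder_in_dict_MCs_MCCs(dict_MCs_MCCs):
-- 	OMC = list(dict_MCs_MCCs.keys())[0]  # allfts model complexity in fts by default taken as the OMC
-- 	omc_mdl_mcc = list(dict_MCs_MCCs.values())[0]
-- 	for mc_as_key in list(dict_MCs_MCCs.keys())[1:]:  #  loop on the rest of the mdl_complexities
-- 		if dict_MCs_MCCs[mc_as_key] > omc_mdl_mcc: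
-- 			OMC = mc_as_key
-- 			omc_mdl_mcc = dict_MCs_MCCs[mc_as_key]
-- 		elif dict_MCs_MCCs[mc_as_key] == omc_mdl_mcc:
-- 			if mc_as_key < OMC:
-- 				OMC = mc_as_key
-- 			# no need to attribute the correspondant value of mcc because an equal value is already there
-- 			else:
-- 				pass
-- 		else:  # case of dict_of_mcc_values_by_mdl_to_update[mc_as_key] < omc_mdl_mcc
-- 			pass
-- 	# the OMC and its mcc variables is updated
-- 	return OMC,omc_mdl_mcc
-- ===== SOURCE B (Python) =====
-- def OMC_founder_in_dict_MCs_MCCs(dict_MCs_MCCs):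
--     items = sorted(dict_MCs_MCCs.items(), key=lambda kv: (-kv[1], kv[0]))
--     return items[0]
-- ===== Notes on version B (the rewrite author's own statement) =====
-- stated objective: simpler
-- what changed: Replaces the explicit best-so-far scan over the keys with per-key dict lookups by a single sorted() over the items with composite key (-value, key) and returning the first item.
import Mathlib
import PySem

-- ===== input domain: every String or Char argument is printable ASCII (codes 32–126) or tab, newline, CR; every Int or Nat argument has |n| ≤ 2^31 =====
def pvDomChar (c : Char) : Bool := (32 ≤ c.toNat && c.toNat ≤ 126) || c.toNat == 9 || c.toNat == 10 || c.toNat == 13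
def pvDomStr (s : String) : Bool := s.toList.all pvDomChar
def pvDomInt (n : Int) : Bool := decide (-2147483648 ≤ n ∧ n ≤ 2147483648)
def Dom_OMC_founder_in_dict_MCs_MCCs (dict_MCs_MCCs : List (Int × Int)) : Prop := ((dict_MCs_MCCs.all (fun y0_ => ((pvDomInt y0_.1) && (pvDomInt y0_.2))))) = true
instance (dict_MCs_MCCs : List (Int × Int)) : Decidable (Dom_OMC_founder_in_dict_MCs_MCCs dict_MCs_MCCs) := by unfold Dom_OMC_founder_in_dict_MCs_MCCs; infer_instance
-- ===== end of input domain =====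

-- B replaces A's best-so-far scan (with dict lookups per key) by one sorted() on the items
-- with composite key (-value, key), returning the first item: simpler, same exact result.


-- ===== PORT A =====
-- the getD defaults are never reached under Pre_: the [0] indexings raise only on the empty
-- dict (excluded) and the dict lookups are at keys taken from the dict itself
def OMC_founder_in_dict_MCs_MCCs (dict_MCs_MCCs : List (Int × Int)) : Int × Int :=
  let dd := PySem.Dict.mk dict_MCs_MCCs
  let OMC0 := ((PySem.List.pyGet? (PySem.Dict.keys dd) 0).getD 0)
  let omc0 := ((PySem.List.pyGet? (PySem.Dict.values dd) 0).getD 0)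
  (PySem.List.slice (PySem.Dict.keys dd) (some 1) none).foldl
    (fun st mc_as_key =>
      let v := PySem.Dict.getD dd mc_as_key 0
      if v > st.2 then (mc_as_key, v)
      else if v = st.2 then (if mc_as_key < st.1 then (mc_as_key, st.2) else st)
      else st)
    (OMC0, omc0)

-- ===== PORT B =====
def OMC_founder_in_dict_MCs_MCCs_alt (dict_MCs_MCCs : List (Int × Int)) : Int × Int :=
  let items := PySem.List.sorted2 (PySem.Dict.items (PySem.Dict.mk dict_MCs_MCCs))
                 (fun kv => -kv.2) (fun kv => kv.1)
  (PySem.List.pyGet? items 0).getD (0, 0)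

-- ===== PRECONDITION & SPEC =====
-- Pre_ excludes the empty dict (A raises IndexError there, B's items[0] too) and association
-- lists with duplicate keys, which do not represent a Python dict (dict construction collapses them).
def Pre_OMC_founder_in_dict_MCs_MCCs (dict_MCs_MCCs : List (Int × Int)) : Prop :=
  dict_MCs_MCCs ≠ [] ∧ (dict_MCs_MCCs.map Prod.fst).Nodup
instance (dict_MCs_MCCs : List (Int × Int)) : Decidable (Pre_OMC_founder_in_dict_MCs_MCCs dict_MCs_MCCs) := by unfold Pre_OMC_founder_in_dict_MCs_MCCs; infer_instance

def pvWitness_OMC_founder_in_dict_MCs_MCCs : (List (Int × Int)) := [(1, 5), (2, 5), (3, 1)]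

def Spec_OMC_founder_in_dict_MCs_MCCs (dict_MCs_MCCs : List (Int × Int)) (out : Int × Int) : Prop := out = OMC_founder_in_dict_MCs_MCCs_alt dict_MCs_MCCs
instance (dict_MCs_MCCs : List (Int × Int)) (out : Int × Int) : Decidable (Spec_OMC_founder_in_dict_MCs_MCCs dict_MCs_MCCs out) := by unfold Spec_OMC_founder_in_dict_MCs_MCCs; infer_instance

-- ===== CLAIM (what is proved, stated in full; the proofs are below) =====
def Claim_equal_OMC_founder_in_dict_MCs_MCCs : Prop := ∀ (dict_MCs_MCCs : List (Int × Int)), Dom_OMC_founder_in_dict_MCs_MCCs dict_MCs_MCCs → Pre_OMC_founder_in_dict_MCs_MCCs dict_MCs_MCCs → Spec_OMC_founder_in_dict_MCs_MCCs dict_MCs_MCCs (OMC_founder_in_dict_MCs_MCCs dict_MCs_MCCs)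

-- ===== LEMMAS AND PROOFS =====

-- the comparison used by B's sorted2 with keys (-v, k)
def pvBefore (x y : Int × Int) : Bool :=
  decide ((-x.2) < (-y.2)) || (!decide ((-y.2) < (-x.2)) && decide (x.1 < y.1))

-- the head of an insertion-sort fold started on a nonempty accumulator is the running
-- "first minimum" of the new elements against the accumulator's head
theorem pvFoldlInsertByHead (before : Int × Int → Int × Int → Bool)
    (xs : List (Int × Int)) (a : Int × Int) (acc : List (Int × Int)) :
    ∃ rest, xs.foldl (fun acc x => PySem.List.insertBy before x acc) (a :: acc)
      = (xs.foldl (fun h x => if before x h then x else h) a) :: rest := by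
  induction xs generalizing a acc with
  | nil => exact ⟨acc, rfl⟩
  | cons x xs ih =>
    simp only [List.foldl_cons]
    by_cases h : before x a = true
    · have : PySem.List.insertBy before x (a :: acc) = x :: a :: acc := by
        simp [PySem.List.insertBy, h]
      rw [this, h]
      simpa using ih x (a :: acc)
    · have hb : before x a = false := by simpa using h
      have : PySem.List.insertBy before x (a :: acc)
          = a :: PySem.List.insertBy before x acc := by
        simp [PySem.List.insertBy, hb]
      rw [this, hb]
      simpa using ih a (PySem.List.insertBy before x acc)

-- B on a nonempty list is the running-minimum fold under pvBefore
theorem pvAltEq (p : Int × Int) (t : List (Int × Int)) :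
    OMC_founder_in_dict_MCs_MCCs_alt (p :: t)
      = t.foldl (fun h x => if pvBefore x h then x else h) p := by
  unfold OMC_founder_in_dict_MCs_MCCs_alt
  have hitems : PySem.Dict.items (PySem.Dict.mk (p :: t)) = p :: t := rfl
  rw [hitems]
  have hsorted : PySem.List.sorted2 (p :: t) (fun kv => -kv.2) (fun kv => kv.1)
      = (p :: t).foldl (fun acc x => PySem.List.insertBy pvBefore x acc) [] := rfl
  rw [hsorted]
  have h1 : (p :: t).foldl (fun acc x => PySem.List.insertBy pvBefore x acc) []
      = t.foldl (fun acc x => PySem.List.insertBy pvBefore x acc) [p] := by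
    simp [PySem.List.insertBy]
  rw [h1]
  obtain ⟨rest, hr⟩ := pvFoldlInsertByHead pvBefore t p []
  rw [hr]
  simp [PySem.List.pyGet?, PySem.List.pyIdx?]

-- A's update step, as a pure function of the state and the current (key, value) pair,
-- coincides with the pvBefore running-minimum step
theorem pvStepEq (st x : Int × Int) :
    (if x.2 > st.2 then (x.1, x.2)
     else if x.2 = st.2 then (if x.1 < st.1 then (x.1, st.2) else st)
     else st)
      = if pvBefore x st then x else st := by
  rcases st with ⟨a, b⟩
  rcases x with ⟨c, d⟩
  simp only [pvBefore]
  by_cases hgt : b < d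
  · simp [hgt, show (-d : Int) < -b by omega]
  · by_cases heq : d = b
    · subst heq
      simp
    · simp [hgt, heq, show ¬((-d : Int) < -b) by omega, show (-b : Int) < -d by omega]

-- ===== VERDICT (by name: the statement is the Claim_ definition above) =====
theorem OMC_founder_in_dict_MCs_MCCs_spec : Claim_equal_OMC_founder_in_dict_MCs_MCCs := by
  unfold Claim_equal_OMC_founder_in_dict_MCs_MCCs
  intro d _ hpre
  obtain ⟨hne, hnd⟩ := hpre
  obtain ⟨p, t, rfl⟩ : ∃ p t, d = p :: t := by
    cases d with
    | nil => exact absurd rfl hne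
    | cons p t => exact ⟨p, t, rfl⟩
  unfold Spec_OMC_founder_in_dict_MCs_MCCs
  rw [pvAltEq]
  unfold OMC_founder_in_dict_MCs_MCCs
  have hkeys : PySem.Dict.keys (PySem.Dict.mk (p :: t)) = (p :: t).map Prod.fst := rfl
  have hvals : PySem.Dict.values (PySem.Dict.mk (p :: t)) = (p :: t).map Prod.snd := rfl
  simp only [hkeys, hvals, List.map_cons]
  have hsl : PySem.List.slice (p.1 :: t.map Prod.fst) (some 1) none = t.map Prod.fst := by
    rw [PySem.List.slice_from _ (by norm_num)]; rfl
  rw [hsl]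
  have hget : (PySem.List.pyGet? (p.1 :: t.map Prod.fst) 0).getD 0 = p.1 := by
    simp [PySem.List.pyGet?, PySem.List.pyIdx?]
  have hget' : (PySem.List.pyGet? (p.2 :: t.map Prod.snd) 0).getD 0 = p.2 := by
    simp [PySem.List.pyGet?, PySem.List.pyIdx?]
  rw [hget, hget', List.foldl_map]
  -- replace the dict lookup at each key of t by the paired value, then apply pvStepEq
  have hpe : ((p.1, p.2) : Int × Int) = p := rfl
  rw [hpe]
  apply PySem.List.foldl_congr_mem
  intro st x hx
  have hlook : PySem.Dict.getD (PySem.Dict.mk (p :: t)) x.1 0 = x.2 := by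
    have hx2 : (x.1, x.2) ∈ (PySem.Dict.mk (p :: t)).items := by
      simpa using List.mem_cons_of_mem p hx
    have hnd2 : (PySem.Dict.mk (p :: t)).keys.Nodup := hnd
    exact PySem.Dict.getD_of_mem_items _ hx2 hnd2 0
  simp only [hlook]
  exact pvStepEq st x
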